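-- pv_equiv track=rewrite | github.com/benjamin-kroeger/dna-labeling-benchmark | src/dna_segmentation_benchmark/eval/junction_errors.py | _get_cascade_lengths
-- ===== SOURCE A (Python) =====
-- def _get_cascade_lengths(
--     residuals: list[int],
--     min_run: int = 3,
-- ) -> list[int]:
--     """Return the lengths of same-sign runs that qualify as cascades."""
--     if len(residuals) < min_run:
--         return []
--
--     signs = [1 if r > 0 else (-1 if r < 0 else 0) for r in residuals]
--     lengths = []
--     run_len = 1
--
--     for i in range(1, len(signs)):
--         if signs[i] != 0 and signs[i] == signs[i - 1]:
--             run_len += 1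
--         else:
--             if run_len >= min_run:
--                 lengths.append(run_len)
--             run_len = 1
--
--     if run_len >= min_run:
--         lengths.append(run_len)
--
--     return lengths
-- ===== SOURCE B (Python) =====
-- def _get_cascade_lengths(
--     residuals: list[int],
--     min_run: int = 3,
-- ) -> list[int]:
--     """Return the lengths of same-sign runs that qualify as cascades."""
--     signs = [(r > 0) - (r < 0) for r in residuals]
--     # A run starts at index 0, at any zero-sign residual, and wherever the sign changes.
--     starts = [i for i in range(len(signs))
--               if i == 0 or signs[i] == 0 or signs[i] != signs[i - 1]]
--     ends = starts[1:] + [len(signs)]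
--     return [e - s for s, e in zip(starts, ends) if e - s >= min_run]
-- ===== Notes on version B (the rewrite author's own statement) =====
-- stated objective: idiomatic
-- what changed: B replaces A's running-counter-with-flush single pass by a two-phase decomposition: compute the run-start boundary indices (index 0, every zero sign, every sign change), pair them with the following boundary via zip to get run lengths, and keep those >= min_run; the redundant length guard is dropped.
-- intended difference: On the empty residual list with min_run <= 0, A returns [1] because the initial run_len=1 of a run that does not exist is flushed by the trailing check, while B returns [], the intended answer since an empty list contains no run at all. — e.g. on _get_cascade_lengths([], 0): A returns [1], B returns []
import Mathlib
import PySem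

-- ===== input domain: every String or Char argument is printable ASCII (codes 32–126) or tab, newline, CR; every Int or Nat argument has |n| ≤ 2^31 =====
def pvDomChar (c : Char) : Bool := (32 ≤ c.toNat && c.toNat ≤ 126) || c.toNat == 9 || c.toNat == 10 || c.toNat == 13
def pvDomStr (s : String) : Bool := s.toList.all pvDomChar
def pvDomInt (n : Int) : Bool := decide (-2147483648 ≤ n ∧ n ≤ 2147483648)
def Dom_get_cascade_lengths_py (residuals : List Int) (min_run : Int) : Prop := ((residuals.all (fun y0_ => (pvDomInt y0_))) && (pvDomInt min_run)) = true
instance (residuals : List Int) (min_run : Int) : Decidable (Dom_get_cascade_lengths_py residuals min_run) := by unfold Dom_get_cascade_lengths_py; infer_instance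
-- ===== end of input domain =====

-- B computes qualifying run lengths from run-start boundary indices zipped with their successors,
-- instead of A's running counter with flush (idiomatic two-phase decomposition; same cost).

-- ===== PORT A =====
-- literal port of A: guard, sign list, index loop 1..n-1 with running counter and flush, final flush
def get_cascade_lengths_py (residuals : List Int) (min_run : Int) : List Int :=
  if (residuals.length : Int) < min_run then []
  else
    let signs := residuals.map (fun r => if 0 < r then (1 : Int) else if r < 0 then -1 else 0)
    let st := (PySem.List.pyRange 1 (signs.length : Int) 1).foldl
      (fun (st : List Int × Int) i =>
        if PySem.List.pyGetD signs i 0 ≠ 0 ∧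
            PySem.List.pyGetD signs i 0 = PySem.List.pyGetD signs (i - 1) 0 then
          (st.1, st.2 + 1)
        else
          ((if min_run ≤ st.2 then st.1 ++ [st.2] else st.1), 1))
      ([], 1)
    if min_run ≤ st.2 then st.1 ++ [st.2] else st.1

-- ===== PORT B =====
-- literal port of B: sign list, run-start indices, shifted ends, zip and filter by min_run
def get_cascade_lengths_py_alt (residuals : List Int) (min_run : Int) : List Int :=
  let signs := residuals.map (fun r => (if 0 < r then (1 : Int) else 0) - (if r < 0 then 1 else 0))
  let starts := (PySem.List.pyRange 0 (signs.length : Int) 1).filter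
      (fun i => decide (i = 0 ∨ PySem.List.pyGetD signs i 0 = 0 ∨
        PySem.List.pyGetD signs i 0 ≠ PySem.List.pyGetD signs (i - 1) 0))
  let ends := starts.drop 1 ++ [(signs.length : Int)]
  (starts.zip ends).filterMap
    (fun se => if min_run ≤ se.2 - se.1 then some (se.2 - se.1) else none)

-- ===== PRECONDITION & SPEC =====
-- On the empty residual list with min_run ≤ 0, A returns [1] (the initial run_len = 1 of a run that
-- does not exist is flushed by the trailing check), while B returns [], the intended answer since an
-- empty list contains no run.
def D_get_cascade_lengths_py (residuals : List Int) (min_run : Int) : Prop :=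
  residuals = [] ∧ min_run ≤ 0
instance (residuals : List Int) (min_run : Int) : Decidable (D_get_cascade_lengths_py residuals min_run) := by unfold D_get_cascade_lengths_py; infer_instance

def Spec_get_cascade_lengths_py (residuals : List Int) (min_run : Int) (out : List Int) : Prop :=
  ¬ D_get_cascade_lengths_py residuals min_run → out = get_cascade_lengths_py_alt residuals min_run
instance (residuals : List Int) (min_run : Int) (out : List Int) : Decidable (Spec_get_cascade_lengths_py residuals min_run out) := by unfold Spec_get_cascade_lengths_py; infer_instance

def pvDiffWitness_get_cascade_lengths_py : List Int × Int := ([], 0)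
def pvDiffWitnessOut_get_cascade_lengths_py : (List Int) × (List Int) := ([1], [])

-- ===== CLAIM (what is proved, stated in full; the proofs are below) =====
def Claim_unchanged_get_cascade_lengths_py : Prop := ∀ (residuals : List Int) (min_run : Int), Dom_get_cascade_lengths_py residuals min_run → Spec_get_cascade_lengths_py residuals min_run (get_cascade_lengths_py residuals min_run)
def Claim_changed_get_cascade_lengths_py : Prop := Dom_get_cascade_lengths_py (pvDiffWitness_get_cascade_lengths_py.1) (pvDiffWitness_get_cascade_lengths_py.2) ∧ D_get_cascade_lengths_py (pvDiffWitness_get_cascade_lengths_py.1) (pvDiffWitness_get_cascade_lengths_py.2) ∧ get_cascade_lengths_py (pvDiffWitness_get_cascade_lengths_py.1) (pvDiffWitness_get_cascade_lengths_py.2) = pvDiffWitnessOut_get_cascade_lengths_py.1 ∧ get_cascade_lengths_py_alt (pvDiffWitness_get_cascade_lengths_py.1) (pvDiffWitness_get_cascade_lengths_py.2) = pvDiffWitnessOut_get_cascade_lengths_py.2 ∧ pvDiffWitnessOut_get_cascade_lengths_py.1 ≠ pvDiffWitnessOut_get_cascade_lengths_py.2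
def Claim_exact_get_cascade_lengths_py : Prop := ∀ (residuals : List Int) (min_run : Int), Dom_get_cascade_lengths_py residuals min_run → D_get_cascade_lengths_py residuals min_run → get_cascade_lengths_py residuals min_run ≠ get_cascade_lengths_py_alt residuals min_run

-- ===== LEMMAS AND PROOFS =====

-- run lengths of the sign list: zeros break runs and form singleton runs; `p` = previous sign, `k` = current run length
def pvRunAux (p k : Int) : List Int → List Int
  | [] => [k]
  | x :: xs => if x ≠ 0 ∧ x = p then pvRunAux x (k + 1) xs else k :: pvRunAux x 1 xs

-- A's flush and loop step, on a (current, previous) sign pair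
def pvFlush (m : Int) (st : List Int × Int) : List Int :=
  if m ≤ st.2 then st.1 ++ [st.2] else st.1

def pvStep (m : Int) (st : List Int × Int) (v : Int × Int) : List Int × Int :=
  if v.1 ≠ 0 ∧ v.1 = v.2 then (st.1, st.2 + 1) else (pvFlush m st, 1)

-- B's run-start indices of the tail, as filtered enumerated (current, previous) windows
def pvStarts (t : List Int) (p i : Int) : List Int :=
  ((PySem.List.enumerate (t.zip (p :: t)) i).filter
    (fun jv => decide (jv.2.1 = 0 ∨ jv.2.1 ≠ jv.2.2))).map (fun x => x.1)

theorem pvStarts_nil (p i : Int) : pvStarts [] p i = [] := rfl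

theorem pvStarts_cons (x : Int) (t : List Int) (p i : Int) :
    pvStarts (x :: t) p i =
      if x = 0 ∨ x ≠ p then i :: pvStarts t x (i + 1) else pvStarts t x (i + 1) := by
  by_cases h : x = 0 ∨ x ≠ p <;>
    simp [pvStarts, PySem.List.enumerate_cons, h]

theorem pvRunAux_nil (p k : Int) : pvRunAux p k [] = [k] := rfl

theorem pvRunAux_cons (p k x : Int) (t : List Int) :
    pvRunAux p k (x :: t)
      = if x ≠ 0 ∧ x = p then pvRunAux x (k + 1) t else k :: pvRunAux x 1 t := rfl

theorem pvStep_mk (m x p : Int) (st : List Int × Int) :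
    pvStep m st (x, p) = if x ≠ 0 ∧ x = p then (st.1, st.2 + 1) else (pvFlush m st, 1) := rfl

theorem pvRunAux_le (p k : Int) (hk : 1 ≤ k) (t : List Int) :
    ∀ x ∈ pvRunAux p k t, x ≤ k + t.length := by
  induction t generalizing p k with
  | nil =>
    intro x hx
    rw [pvRunAux_nil, List.mem_singleton] at hx
    simp [hx]
  | cons y ys ih =>
    intro x hx
    rw [pvRunAux_cons] at hx
    simp only [List.length_cons]
    by_cases h : y ≠ 0 ∧ y = p
    · rw [if_pos h] at hx
      have hb := ih y (k + 1) (by omega) x hx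
      push_cast at hb ⊢
      omega
    · rw [if_neg h] at hx
      rcases List.mem_cons.1 hx with h1 | h1
      · subst h1
        push_cast
        omega
      · have hb := ih y 1 le_rfl x h1
        push_cast at hb ⊢
        omega

theorem pvA_fold (m : Int) (t : List Int) :
    ∀ (p k : Int) (acc : List Int),
      pvFlush m ((t.zip (p :: t)).foldl (pvStep m) (acc, k))
        = acc ++ (pvRunAux p k t).filter (fun x => decide (m ≤ x)) := by
  induction t with
  | nil =>
    intro p k acc
    by_cases h : m ≤ k <;> simp [pvFlush, pvRunAux_nil, h]
  | cons x t' ih =>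
    intro p k acc
    rw [List.zip_cons_cons, List.foldl_cons, pvStep_mk, pvRunAux_cons]
    by_cases h : x ≠ 0 ∧ x = p
    · rw [if_pos h, if_pos h,
        show ((acc, k).1, (acc, k).2 + 1) = (acc, k + 1) from rfl, ih x (k + 1) acc]
    · rw [if_neg h, if_neg h, ih x 1 (pvFlush m (acc, k)), List.filter_cons]
      by_cases hk : m ≤ k <;> simp [pvFlush, hk, List.append_assoc]

theorem pvB_zip (m : Int) (t : List Int) :
    ∀ (p b i : Int),
      ((b :: pvStarts t p i).zip (pvStarts t p i ++ [i + (t.length : Int)])).filterMap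
          (fun se => if m ≤ se.2 - se.1 then some (se.2 - se.1) else none)
        = (pvRunAux p (i - b) t).filter (fun x => decide (m ≤ x)) := by
  induction t with
  | nil =>
    intro p b i
    by_cases h : m ≤ i - b
    · simp [pvStarts_nil, pvRunAux_nil, List.filterMap, h]
    · simp [pvStarts_nil, pvRunAux_nil, List.filterMap, h]
  | cons x t' ih =>
    intro p b i
    have hlen : i + ((x :: t').length : Int) = (i + 1) + (t'.length : Int) := by
      simp only [List.length_cons]; push_cast; ring
    rw [pvStarts_cons, hlen, pvRunAux_cons]
    by_cases h : x = 0 ∨ x ≠ p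
    · -- a new run starts at index i
      have hcond : ¬ (x ≠ 0 ∧ x = p) := by tauto
      rw [if_pos h, if_neg hcond, List.cons_append, List.zip_cons_cons, List.filterMap_cons]
      have hih := ih x i (i + 1)
      rw [show (i + 1) - i = (1 : Int) by ring] at hih
      rw [hih, List.filter_cons]
      by_cases hk : m ≤ i - b <;> simp [hk]
    · -- the run extends
      have hcond : x ≠ 0 ∧ x = p := by tauto
      rw [if_neg h, if_pos hcond]
      have hih := ih x b (i + 1)
      rw [show (i + 1) - b = (i - b) + 1 by ring] at hih
      rw [hih]

-- the two sign formulas agree pointwise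
theorem pvSigns_eq (residuals : List Int) :
    residuals.map (fun r => (if 0 < r then (1 : Int) else 0) - (if r < 0 then 1 else 0))
      = residuals.map (fun r => if 0 < r then (1 : Int) else if r < 0 then -1 else 0) := by
  apply List.map_congr_left
  intro r _
  by_cases h1 : 0 < r
  · by_cases h2 : r < 0
    · omega
    · simp [h1, h2]
  · by_cases h2 : r < 0
    · simp [h1, h2]
    · simp [h1, h2]

theorem pvWindowLen (h : Int) (t : List Int) : (t.zip (h :: t)).length = t.length := by
  simp [List.length_zip]

-- the (index, window) pairs of the enumerated tail: index bounds and what the window holds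
theorem pvWindow_eq (h : Int) (t : List Int) (j : Int) (v : Int × Int)
    (hm : (j, v) ∈ PySem.List.enumerate (t.zip (h :: t)) 1) :
    1 ≤ j ∧ PySem.List.pyGetD (h :: t) j 0 = v.1 ∧
      PySem.List.pyGetD (h :: t) (j - 1) 0 = v.2 := by
  rw [PySem.List.mem_enumerate_iff] at hm
  obtain ⟨k, hk, hp⟩ := hm
  rw [Prod.ext_iff] at hp
  obtain ⟨hj, hv⟩ := hp
  simp only at hj hv
  have hkt : k < t.length := by
    have := hk; rw [pvWindowLen] at this; exact this
  have hvk : v = (t[k]'hkt, (h :: t)[k]'(by simp; omega)) := by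
    rw [hv]; simp [List.getElem_zip]
  refine ⟨by omega, ?_, ?_⟩
  · have hjn : j = ((k + 1 : Nat) : Int) := by push_cast; omega
    rw [hjn, PySem.List.pyGetD_natCast, hvk]
    simp [List.getD_eq_getElem?_getD, List.getElem?_eq_getElem (by simpa using hkt)]
  · have hjn : j - 1 = ((k : Nat) : Int) := by omega
    rw [hjn, PySem.List.pyGetD_natCast, hvk]
    simp [List.getD_eq_getElem?_getD, List.getElem?_eq_getElem (show k < (h :: t).length by simp; omega)]

-- the index range 1..n-1 is the first projection of the enumerated windows
theorem pvRange_eq (h : Int) (t : List Int) :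
    PySem.List.pyRange 1 (((h :: t).length : Nat) : Int)
      = (PySem.List.enumerate (t.zip (h :: t)) 1).map (fun x => x.1) := by
  rw [PySem.List.map_fst_enumerate]
  congr 1
  rw [pvWindowLen]
  simp only [List.length_cons]
  push_cast
  ring

-- A's index loop plus trailing flush computes the qualifying run lengths
theorem pvA_loop (m h : Int) (t : List Int) :
    pvFlush m ((PySem.List.pyRange 1 (((h :: t).length : Nat) : Int)).foldl
      (fun (st : List Int × Int) i =>
        if PySem.List.pyGetD (h :: t) i 0 ≠ 0 ∧
            PySem.List.pyGetD (h :: t) i 0 = PySem.List.pyGetD (h :: t) (i - 1) 0 then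
          (st.1, st.2 + 1)
        else
          ((if m ≤ st.2 then st.1 ++ [st.2] else st.1), 1))
      ([], 1))
    = (pvRunAux h 1 t).filter (fun x => decide (m ≤ x)) := by
  rw [pvRange_eq, List.foldl_map]
  rw [PySem.List.foldl_congr_mem _ _ (fun st v => pvStep m st v.2) _ ?hc]
  case hc =>
    intro acc x hx
    obtain ⟨hj, hv1, hv2⟩ := pvWindow_eq h t x.1 x.2 (by simpa using hx)
    rw [hv1, hv2]
    simp [pvStep, pvFlush]
  rw [← List.foldl_map (f := fun v : Int × (Int × Int) => v.2) (g := pvStep m)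
      (l := PySem.List.enumerate (t.zip (h :: t)) 1) (init := (([], 1) : List Int × Int)),
    PySem.List.map_snd_enumerate]
  simpa using pvA_fold m t h 1 []

-- B's boundary-index computation computes the same qualifying run lengths
theorem pvB_loop (m h : Int) (t : List Int) :
    (let signs := h :: t
     let starts := (PySem.List.pyRange 0 (signs.length : Int) 1).filter
        (fun i => decide (i = 0 ∨ PySem.List.pyGetD signs i 0 = 0 ∨
          PySem.List.pyGetD signs i 0 ≠ PySem.List.pyGetD signs (i - 1) 0))
     let ends := starts.drop 1 ++ [(signs.length : Int)]
     (starts.zip ends).filterMap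
       (fun se => if m ≤ se.2 - se.1 then some (se.2 - se.1) else none))
    = (pvRunAux h 1 t).filter (fun x => decide (m ≤ x)) := by
  show ((List.filter _ _).zip _).filterMap _ = _
  have hpos : (0 : Int) < (((h :: t).length : Nat) : Int) := by simp
  have hS : (PySem.List.pyRange 0 (((h :: t).length : Nat) : Int) 1).filter
      (fun i => decide (i = 0 ∨ PySem.List.pyGetD (h :: t) i 0 = 0 ∨
        PySem.List.pyGetD (h :: t) i 0 ≠ PySem.List.pyGetD (h :: t) (i - 1) 0))
      = 0 :: pvStarts t h 1 := by
    rw [PySem.List.pyRange_one_cons hpos, List.filter_cons]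
    have h0 : decide ((0 : Int) = 0 ∨ PySem.List.pyGetD (h :: t) 0 0 = 0 ∨
        PySem.List.pyGetD (h :: t) 0 0 ≠ PySem.List.pyGetD (h :: t) (0 - 1) 0) = true := by
      simp
    rw [if_pos h0, zero_add]
    congr 1
    rw [pvRange_eq, List.filter_map]
    rw [List.filter_congr (q := fun jv : Int × (Int × Int) =>
        decide (jv.2.1 = 0 ∨ jv.2.1 ≠ jv.2.2)) ?hq]
    case hq =>
      intro x hx
      obtain ⟨hj, hv1, hv2⟩ := pvWindow_eq h t x.1 x.2 (by simpa using hx)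
      simp only [Function.comp]
      rw [hv1, hv2, decide_eq_decide]
      constructor
      · rintro (h0 | hrest)
        · omega
        · exact hrest
      · intro hr; exact Or.inr hr
    rfl
  rw [hS]
  have hd : (0 :: pvStarts t h 1).drop 1 = pvStarts t h 1 := rfl
  rw [hd]
  have hn : (((h :: t).length : Nat) : Int) = 1 + (t.length : Int) := by
    simp only [List.length_cons]; push_cast; ring
  rw [hn]
  have := pvB_zip m t h 0 1
  rw [show (1 : Int) - 0 = 1 by ring] at this
  exact this

theorem pvB_nil (m : Int) : get_cascade_lengths_py_alt [] m = [] := by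
  simp [get_cascade_lengths_py_alt, PySem.List.pyRange_one_eq_nil]

theorem pvMain (residuals : List Int) (min_run : Int)
    (hD : ¬ D_get_cascade_lengths_py residuals min_run) :
    get_cascade_lengths_py residuals min_run = get_cascade_lengths_py_alt residuals min_run := by
  cases residuals with
  | nil =>
    have hmin : 0 < min_run := by
      by_contra hc
      exact hD ⟨rfl, by omega⟩
    have hA : get_cascade_lengths_py [] min_run = [] := by
      unfold get_cascade_lengths_py
      rw [if_pos (by simpa using hmin)]
    rw [hA, pvB_nil]
  | cons r rs =>
    have hB : get_cascade_lengths_py_alt (r :: rs) min_run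
        = (pvRunAux (if 0 < r then (1 : Int) else if r < 0 then -1 else 0) 1
            (rs.map (fun x => if 0 < x then (1 : Int) else if x < 0 then -1 else 0))).filter
            (fun x => decide (min_run ≤ x)) := by
      unfold get_cascade_lengths_py_alt
      simp only [pvSigns_eq]
      simp only [List.map_cons]
      exact pvB_loop min_run _ _
    by_cases hg : (((r :: rs).length : Nat) : Int) < min_run
    · have hA : get_cascade_lengths_py (r :: rs) min_run = [] := by
        unfold get_cascade_lengths_py
        rw [if_pos hg]
      rw [hA, hB]
      symm
      rw [List.filter_eq_nil_iff]
      intro x hx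
      have hb := pvRunAux_le _ 1 le_rfl _ x hx
      simp only [List.length_map] at hb
      simp only [List.length_cons] at hg
      simp only [decide_eq_true_eq]
      push_cast at hb hg
      omega
    · have hA : get_cascade_lengths_py (r :: rs) min_run
          = (pvRunAux (if 0 < r then (1 : Int) else if r < 0 then -1 else 0) 1
              (rs.map (fun x => if 0 < x then (1 : Int) else if x < 0 then -1 else 0))).filter
              (fun x => decide (min_run ≤ x)) := by
        unfold get_cascade_lengths_py
        rw [if_neg hg]
        simp only [List.map_cons]
        exact pvA_loop min_run _ _
      rw [hA, hB]

-- ===== VERDICT (by name: the statement is the Claim_ definition above) =====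
theorem get_cascade_lengths_py_spec : Claim_unchanged_get_cascade_lengths_py := by
  intro residuals min_run _ hD
  exact pvMain residuals min_run hD

theorem get_cascade_lengths_py_changed : Claim_changed_get_cascade_lengths_py := by
  unfold Claim_changed_get_cascade_lengths_py; decide

theorem get_cascade_lengths_py_tight : Claim_exact_get_cascade_lengths_py := by
  intro residuals min_run _ hd
  obtain ⟨h1, h2⟩ := hd
  subst h1
  have hA : get_cascade_lengths_py [] min_run = [1] := by
    unfold get_cascade_lengths_py
    rw [if_neg (by simpa using not_lt.2 (by omega : min_run ≤ 0))]
    simp [PySem.List.pyRange_one_eq_nil]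
    omega
  rw [hA, pvB_nil]
  simp
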